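-- pv_equiv track=rewrite | github.com/jobin2201/numoni-mutlidb-system | part4_analysing_the_filters/compare_keywords_handler.py | _infer_scope
-- ===== SOURCE A (Python) =====
-- from typing import Any, Callable, Dict, List, Tuple
--
-- def _safe_text(value: Any) -> str:
--     if value is None:
--         return ""
--     return str(value).strip()
--
-- def _infer_scope(query: str) -> str:
--     q = _safe_text(query).lower()
--     if "merchant" in q or "business" in q or "vendor" in q or "store" in q:
--         return "merchant"
--     if "customer" in q or "client" in q:
--         return "customer"
--     if any(token in q for token in ["deal", "payout", "merchantlocation"]):
--         return "merchant"
--     if any(token in q for token in ["invoice", "favourite", "favorite"]):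
--         return "customer"
--     return "user"
-- ===== SOURCE B (Python) =====
-- _KW_PRIORITY = {
--     "merchant": 1, "business": 1, "vendor": 1, "store": 1,
--     "customer": 2, "client": 2,
--     "deal": 3, "payout": 3, "merchantlocation": 3,
--     "invoice": 4, "favourite": 4, "favorite": 4,
-- }
-- _SCOPE = {1: "merchant", 2: "customer", 3: "merchant", 4: "customer", 5: "user"}
--
-- def _infer_scope(query: str) -> str:
--     q = str(query).strip().lower()
--     best = 5
--     for i in range(len(q)):
--         for kw, pr in _KW_PRIORITY.items():
--             if pr < best and q.startswith(kw, i):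
--                 best = pr
--     return _SCOPE[best]
-- ===== Notes on version B (the rewrite author's own statement) =====
-- stated objective: alternative
-- what changed: Replaced the ordered cascade of per-keyword substring-membership tests with a single left-to-right position scan of the normalized string that, at each position, checks which keywords start there against a keyword-to-priority map and keeps the minimal priority seen, mapping the final minimum to its scope.
import Mathlib
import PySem

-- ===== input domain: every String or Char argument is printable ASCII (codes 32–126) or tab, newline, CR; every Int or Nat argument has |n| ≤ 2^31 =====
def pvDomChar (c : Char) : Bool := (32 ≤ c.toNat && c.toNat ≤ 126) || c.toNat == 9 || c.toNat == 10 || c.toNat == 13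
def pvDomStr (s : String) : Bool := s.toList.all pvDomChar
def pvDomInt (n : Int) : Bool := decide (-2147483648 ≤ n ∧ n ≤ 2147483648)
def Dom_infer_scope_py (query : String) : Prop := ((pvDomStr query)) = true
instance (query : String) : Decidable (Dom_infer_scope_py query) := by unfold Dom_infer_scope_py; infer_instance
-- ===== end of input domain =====

-- B replaces A's ordered cascade of substring-membership tests by a single position scan
-- of the normalized string that keeps the minimal priority of any keyword starting at a
-- position (alternative algorithm, same asymptotic cost).

-- ===== PORT A =====
-- _safe_text: query is a str here, so str(query) = query; the None branch is unreachable
def safe_text_py (value : String) : String := PySem.Str.strip value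

def infer_scope_py (query : String) : String :=
  let q := PySem.Str.lower (safe_text_py query)
  if PySem.Str.isIn "merchant" q || PySem.Str.isIn "business" q || PySem.Str.isIn "vendor" q || PySem.Str.isIn "store" q then
    "merchant"
  else if PySem.Str.isIn "customer" q || PySem.Str.isIn "client" q then
    "customer"
  else if (["deal", "payout", "merchantlocation"] : List String).any (fun token => PySem.Str.isIn token q) then
    "merchant"
  else if (["invoice", "favourite", "favorite"] : List String).any (fun token => PySem.Str.isIn token q) then
    "customer"
  else
    "user"

-- ===== PORT B =====
-- _KW_PRIORITY.items(), in insertion order, as (keyword characters, priority) pairs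
def kwTable : List (List Char × Nat) :=
  [("merchant".toList, 1), ("business".toList, 1), ("vendor".toList, 1), ("store".toList, 1),
   ("customer".toList, 2), ("client".toList, 2),
   ("deal".toList, 3), ("payout".toList, 3), ("merchantlocation".toList, 3),
   ("invoice".toList, 4), ("favourite".toList, 4), ("favorite".toList, 4)]

-- inner for-loop body: q.startswith(kw, i) with 0 ≤ i ≤ len(q) is exactly kw.isPrefixOf (q.drop i)
def scanStep (q : List Char) (i : Nat) (b : Nat) : Nat :=
  kwTable.foldl (fun b' p => if p.2 < b' && p.1.isPrefixOf (q.drop i) then p.2 else b') b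

def infer_scope_py_alt (query : String) : String :=
  let q := (PySem.Str.lower (PySem.Str.strip query)).toList
  let best := (List.range q.length).foldl (fun b i => scanStep q i b) 5
  -- _SCOPE[best]; best is always a key of _SCOPE, so the lookup never raises
  ((PySem.Dict.ofList [(1, "merchant"), (2, "customer"), (3, "merchant"), (4, "customer"), (5, "user")]).get? best).getD ""

-- ===== PRECONDITION & SPEC =====
def Spec_infer_scope_py (query : String) (out : String) : Prop := out = infer_scope_py_alt query
instance (query : String) (out : String) : Decidable (Spec_infer_scope_py query out) := by unfold Spec_infer_scope_py; infer_instance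

-- ===== CLAIM (what is proved, stated in full; the proofs are below) =====
def Claim_equal_infer_scope_py : Prop := ∀ (query : String), Dom_infer_scope_py query → Spec_infer_scope_py query (infer_scope_py query)

-- ===== LEMMAS AND PROOFS =====

-- the inner fold never increases the accumulator
theorem inner_le (q : List Char) (i : Nat) :
    ∀ (l : List (List Char × Nat)) (b : Nat),
      l.foldl (fun b' p => if p.2 < b' && p.1.isPrefixOf (q.drop i) then p.2 else b') b ≤ b := by
  intro l
  induction l with
  | nil => intro b; simp
  | cons p t ih =>
    intro b
    simp only [List.foldl_cons]
    refine le_trans (ih _) ?_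
    split_ifs with h
    · simp only [Bool.and_eq_true, decide_eq_true_eq] at h
      exact le_of_lt h.1
    · exact le_rfl

-- if a keyword of the table matches at i, the inner fold result is ≤ its priority
theorem inner_le_of_mem (q : List Char) (i : Nat) :
    ∀ (l : List (List Char × Nat)) (b : Nat) (p : List Char × Nat),
      p ∈ l → p.1.isPrefixOf (q.drop i) = true →
      l.foldl (fun b' p => if p.2 < b' && p.1.isPrefixOf (q.drop i) then p.2 else b') b ≤ p.2 := by
  intro l
  induction l with
  | nil => intro b p hp; simp at hp
  | cons p0 t ih =>
    intro b p hp hpre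
    simp only [List.foldl_cons]
    rcases List.mem_cons.mp hp with rfl | hp
    · refine le_trans (inner_le q i t _) ?_
      split_ifs with h
      · exact le_rfl
      · simp only [hpre, Bool.and_true, decide_eq_true_eq] at h
        omega
    · exact ih _ p hp hpre

-- the inner fold result is the accumulator or the priority of some matching keyword
theorem inner_cases (q : List Char) (i : Nat) :
    ∀ (l : List (List Char × Nat)) (b : Nat),
      (l.foldl (fun b' p => if p.2 < b' && p.1.isPrefixOf (q.drop i) then p.2 else b') b = b) ∨
      ∃ p ∈ l, p.1.isPrefixOf (q.drop i) = true ∧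
        l.foldl (fun b' p => if p.2 < b' && p.1.isPrefixOf (q.drop i) then p.2 else b') b = p.2 := by
  intro l
  induction l with
  | nil => intro b; left; rfl
  | cons p0 t ih =>
    intro b
    simp only [List.foldl_cons]
    rcases ih (if p0.2 < b && p0.1.isPrefixOf (q.drop i) then p0.2 else b) with h | ⟨p, hp, hpre, hres⟩
    · rw [h]
      split_ifs with hg
      · exact Or.inr ⟨p0, List.mem_cons_self, (by simp only [Bool.and_eq_true] at hg; exact hg.2), rfl⟩
      · exact Or.inl rfl
    · exact Or.inr ⟨p, List.mem_cons_of_mem _ hp, hpre, hres⟩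

-- same three facts for the outer fold over the positions
theorem outer_le (q : List Char) :
    ∀ (is : List Nat) (b : Nat), (is.foldl (fun b i => scanStep q i b) b) ≤ b := by
  intro is
  induction is with
  | nil => intro b; simp
  | cons i t ih =>
    intro b
    simp only [List.foldl_cons]
    exact le_trans (ih _) (inner_le q i kwTable b)

theorem outer_le_of_mem (q : List Char) :
    ∀ (is : List Nat) (b : Nat) (i : Nat) (p : List Char × Nat),
      i ∈ is → p ∈ kwTable → p.1.isPrefixOf (q.drop i) = true →
      (is.foldl (fun b i => scanStep q i b) b) ≤ p.2 := by
  intro is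
  induction is with
  | nil => intro b i p hi; simp at hi
  | cons i0 t ih =>
    intro b i p hi hp hpre
    simp only [List.foldl_cons]
    rcases List.mem_cons.mp hi with rfl | hi
    · exact le_trans (outer_le q t _) (inner_le_of_mem q i kwTable b p hp hpre)
    · exact ih _ i p hi hp hpre

theorem outer_cases (q : List Char) :
    ∀ (is : List Nat) (b : Nat),
      (is.foldl (fun b i => scanStep q i b) b = b) ∨
      ∃ i ∈ is, ∃ p ∈ kwTable, p.1.isPrefixOf (q.drop i) = true ∧
        is.foldl (fun b i => scanStep q i b) b = p.2 := by
  intro is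
  induction is with
  | nil => intro b; left; rfl
  | cons i0 t ih =>
    intro b
    simp only [List.foldl_cons]
    rcases ih (scanStep q i0 b) with h | ⟨i, hi, p, hp, hpre, hres⟩
    · rw [h]
      rcases inner_cases q i0 kwTable b with h2 | ⟨p, hp, hpre, hres⟩
      · exact Or.inl h2
      · exact Or.inr ⟨i0, List.mem_cons_self, p, hp, hpre, hres⟩
    · exact Or.inr ⟨i, List.mem_cons_of_mem _ hi, p, hp, hpre, hres⟩

-- bridge: "a keyword matches at some scanned position" = Python's substring test
theorem matched_iff (kw s : String) (h : kw.toList ≠ []) :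
    (∃ i ∈ List.range s.toList.length, kw.toList.isPrefixOf (s.toList.drop i) = true) ↔
      PySem.Str.isIn kw s = true := by
  rw [PySem.Str.isIn_iff_infix]
  rw [← PySem.Chars.isIn_iff_infix, ← PySem.Chars.exists_prefix_drop_iff_isIn]
  constructor
  · rintro ⟨i, _, hpre⟩
    exact ⟨i, List.isPrefixOf_iff_prefix.mp hpre⟩
  · rintro ⟨j, hpre⟩
    by_cases hj : j < s.toList.length
    · exact ⟨j, List.mem_range.mpr hj, List.isPrefixOf_iff_prefix.mpr hpre⟩
    · exfalso
      rw [List.drop_eq_nil_of_le (le_of_not_gt hj)] at hpre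
      exact h (List.prefix_nil.mp hpre)

-- best value of the scan, as a named abbreviation for the proofs
def bestOf (s : String) : Nat :=
  (List.range s.toList.length).foldl (fun b i => scanStep s.toList i b) 5

theorem alt_eq (query : String) :
    infer_scope_py_alt query =
      ((PySem.Dict.ofList [(1, "merchant"), (2, "customer"), (3, "merchant"), (4, "customer"), (5, "user")]).get?
        (bestOf (PySem.Str.lower (PySem.Str.strip query)))).getD "" := rfl

theorem a_eq (query : String) :
    infer_scope_py query =
      (if (PySem.Str.isIn "merchant" (PySem.Str.lower (PySem.Str.strip query)) || PySem.Str.isIn "business" (PySem.Str.lower (PySem.Str.strip query)) || PySem.Str.isIn "vendor" (PySem.Str.lower (PySem.Str.strip query)) || PySem.Str.isIn "store" (PySem.Str.lower (PySem.Str.strip query))) = true then "merchant"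
       else if (PySem.Str.isIn "customer" (PySem.Str.lower (PySem.Str.strip query)) || PySem.Str.isIn "client" (PySem.Str.lower (PySem.Str.strip query))) = true then "customer"
       else if (PySem.Str.isIn "deal" (PySem.Str.lower (PySem.Str.strip query)) || (PySem.Str.isIn "payout" (PySem.Str.lower (PySem.Str.strip query)) || PySem.Str.isIn "merchantlocation" (PySem.Str.lower (PySem.Str.strip query)))) = true then "merchant"
       else if (PySem.Str.isIn "invoice" (PySem.Str.lower (PySem.Str.strip query)) || (PySem.Str.isIn "favourite" (PySem.Str.lower (PySem.Str.strip query)) || PySem.Str.isIn "favorite" (PySem.Str.lower (PySem.Str.strip query)))) = true then "customer"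
       else "user") := by
  simp only [infer_scope_py, safe_text_py, List.any_cons, List.any_nil, Bool.or_false]

theorem best_le_of_isIn (s kw : String) (pr : Nat)
    (hmem : (kw.toList, pr) ∈ kwTable) (hne : kw.toList ≠ [])
    (h : PySem.Str.isIn kw s = true) : bestOf s ≤ pr := by
  obtain ⟨i, hi, hpre⟩ := (matched_iff kw s hne).mpr h
  exact outer_le_of_mem s.toList _ 5 i (kw.toList, pr) hi hmem hpre

theorem best_cases (s : String) :
    bestOf s = 5 ∨
    (bestOf s = 1 ∧ (PySem.Str.isIn "merchant" s || PySem.Str.isIn "business" s || PySem.Str.isIn "vendor" s || PySem.Str.isIn "store" s) = true) ∨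
    (bestOf s = 2 ∧ (PySem.Str.isIn "customer" s || PySem.Str.isIn "client" s) = true) ∨
    (bestOf s = 3 ∧ (PySem.Str.isIn "deal" s || (PySem.Str.isIn "payout" s || PySem.Str.isIn "merchantlocation" s)) = true) ∨
    (bestOf s = 4 ∧ (PySem.Str.isIn "invoice" s || (PySem.Str.isIn "favourite" s || PySem.Str.isIn "favorite" s)) = true) := by
  unfold bestOf
  rcases outer_cases s.toList (List.range s.toList.length) 5 with h | ⟨i, hi, p, hp, hpre, hres⟩
  · exact Or.inl h
  · right
    fin_cases hp
    · exact Or.inl ⟨hres, by simp only [Bool.or_eq_true]; exact Or.inl (Or.inl (Or.inl ((matched_iff "merchant" s (by decide)).mp ⟨i, hi, hpre⟩)))⟩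
    · exact Or.inl ⟨hres, by simp only [Bool.or_eq_true]; exact Or.inl (Or.inl (Or.inr ((matched_iff "business" s (by decide)).mp ⟨i, hi, hpre⟩)))⟩
    · exact Or.inl ⟨hres, by simp only [Bool.or_eq_true]; exact Or.inl (Or.inr ((matched_iff "vendor" s (by decide)).mp ⟨i, hi, hpre⟩))⟩
    · exact Or.inl ⟨hres, by simp only [Bool.or_eq_true]; exact Or.inr ((matched_iff "store" s (by decide)).mp ⟨i, hi, hpre⟩)⟩
    · exact Or.inr (Or.inl ⟨hres, by simp only [Bool.or_eq_true]; exact Or.inl ((matched_iff "customer" s (by decide)).mp ⟨i, hi, hpre⟩)⟩)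
    · exact Or.inr (Or.inl ⟨hres, by simp only [Bool.or_eq_true]; exact Or.inr ((matched_iff "client" s (by decide)).mp ⟨i, hi, hpre⟩)⟩)
    · exact Or.inr (Or.inr (Or.inl ⟨hres, by simp only [Bool.or_eq_true]; exact Or.inl ((matched_iff "deal" s (by decide)).mp ⟨i, hi, hpre⟩)⟩))
    · exact Or.inr (Or.inr (Or.inl ⟨hres, by simp only [Bool.or_eq_true]; exact Or.inr (Or.inl ((matched_iff "payout" s (by decide)).mp ⟨i, hi, hpre⟩))⟩))
    · exact Or.inr (Or.inr (Or.inl ⟨hres, by simp only [Bool.or_eq_true]; exact Or.inr (Or.inr ((matched_iff "merchantlocation" s (by decide)).mp ⟨i, hi, hpre⟩))⟩))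
    · exact Or.inr (Or.inr (Or.inr ⟨hres, by simp only [Bool.or_eq_true]; exact Or.inl ((matched_iff "invoice" s (by decide)).mp ⟨i, hi, hpre⟩)⟩))
    · exact Or.inr (Or.inr (Or.inr ⟨hres, by simp only [Bool.or_eq_true]; exact Or.inr (Or.inl ((matched_iff "favourite" s (by decide)).mp ⟨i, hi, hpre⟩))⟩))
    · exact Or.inr (Or.inr (Or.inr ⟨hres, by simp only [Bool.or_eq_true]; exact Or.inr (Or.inr ((matched_iff "favorite" s (by decide)).mp ⟨i, hi, hpre⟩))⟩))

-- ===== VERDICT (by name: the statement is the Claim_ definition above) =====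
theorem infer_scope_py_spec : Claim_equal_infer_scope_py := by
  intro query _
  unfold Spec_infer_scope_py
  rw [a_eq, alt_eq]
  set s := PySem.Str.lower (PySem.Str.strip query) with hs
  rcases (PySem.Str.isIn "merchant" s || PySem.Str.isIn "business" s || PySem.Str.isIn "vendor" s || PySem.Str.isIn "store" s).eq_false_or_eq_true with h1 | h1
  case inl =>
    have hle : bestOf s ≤ 1 := by
      simp only [Bool.or_eq_true] at h1
      rcases h1 with ((h | h) | h) | h
      · exact best_le_of_isIn s "merchant" 1 (by decide) (by decide) h
      · exact best_le_of_isIn s "business" 1 (by decide) (by decide) h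
      · exact best_le_of_isIn s "vendor" 1 (by decide) (by decide) h
      · exact best_le_of_isIn s "store" 1 (by decide) (by decide) h
    have hbest : bestOf s = 1 := by
      rcases best_cases s with h | ⟨h, _⟩ | ⟨h, _⟩ | ⟨h, _⟩ | ⟨h, _⟩ <;> omega
    rw [hbest, h1]; rfl
  case inr =>
  rcases (PySem.Str.isIn "customer" s || PySem.Str.isIn "client" s).eq_false_or_eq_true with h2 | h2
  case inl =>
    have hle : bestOf s ≤ 2 := by
      simp only [Bool.or_eq_true] at h2
      rcases h2 with h | h
      · exact best_le_of_isIn s "customer" 2 (by decide) (by decide) h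
      · exact best_le_of_isIn s "client" 2 (by decide) (by decide) h
    have hbest : bestOf s = 2 := by
      rcases best_cases s with h | ⟨h, hg⟩ | ⟨h, _⟩ | ⟨h, _⟩ | ⟨h, _⟩
      · omega
      · rw [h1] at hg; cases hg
      · exact h
      · omega
      · omega
    rw [hbest, h1, h2]; rfl
  case inr =>
  rcases (PySem.Str.isIn "deal" s || (PySem.Str.isIn "payout" s || PySem.Str.isIn "merchantlocation" s)).eq_false_or_eq_true with h3 | h3
  case inl =>
    have hle : bestOf s ≤ 3 := by
      simp only [Bool.or_eq_true] at h3
      rcases h3 with h | (h | h)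
      · exact best_le_of_isIn s "deal" 3 (by decide) (by decide) h
      · exact best_le_of_isIn s "payout" 3 (by decide) (by decide) h
      · exact best_le_of_isIn s "merchantlocation" 3 (by decide) (by decide) h
    have hbest : bestOf s = 3 := by
      rcases best_cases s with h | ⟨h, hg⟩ | ⟨h, hg⟩ | ⟨h, _⟩ | ⟨h, _⟩
      · omega
      · rw [h1] at hg; cases hg
      · rw [h2] at hg; cases hg
      · exact h
      · omega
    rw [hbest, h1, h2, h3]; rfl
  case inr =>
  rcases (PySem.Str.isIn "invoice" s || (PySem.Str.isIn "favourite" s || PySem.Str.isIn "favorite" s)).eq_false_or_eq_true with h4 | h4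
  case inl =>
    have hbest : bestOf s = 4 := by
      have hle : bestOf s ≤ 4 := by
        simp only [Bool.or_eq_true] at h4
        rcases h4 with h | (h | h)
        · exact best_le_of_isIn s "invoice" 4 (by decide) (by decide) h
        · exact best_le_of_isIn s "favourite" 4 (by decide) (by decide) h
        · exact best_le_of_isIn s "favorite" 4 (by decide) (by decide) h
      rcases best_cases s with h | ⟨h, hg⟩ | ⟨h, hg⟩ | ⟨h, hg⟩ | ⟨h, _⟩
      · omega
      · rw [h1] at hg; cases hg
      · rw [h2] at hg; cases hg
      · rw [h3] at hg; cases hg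
      · exact h
    rw [hbest, h1, h2, h3, h4]; rfl
  case inr =>
    have hbest : bestOf s = 5 := by
      rcases best_cases s with h | ⟨h, hg⟩ | ⟨h, hg⟩ | ⟨h, hg⟩ | ⟨h, hg⟩
      · exact h
      · rw [h1] at hg; cases hg
      · rw [h2] at hg; cases hg
      · rw [h3] at hg; cases hg
      · rw [h4] at hg; cases hg
    rw [hbest, h1, h2, h3, h4]; rfl
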